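-- pv_equiv track=rewrite | github.com/tientien01/LTKHDL---Pfizer-Vaccine-Tweets---23120370 | src/data_processing.py | calculate_m
-- ===== SOURCE A (Python) =====
-- def is_basic_vowel(ch: str) -> bool:
--     """Kiểm tra nguyên âm cơ bản (a, e, i, o, u)"""
--     return ch in "aeiou"
--
-- def is_vowel_porter(word: str, i: int) -> bool:
--     """
--     Xác định nguyên âm theo quy tắc Porter, bao gồm xử lý chữ 'y'.
--     'y' được coi là nguyên âm nếu nó theo sau một phụ âm và không đứng đầu từ.
--     """
--     ch = word[i].lower()
--     if is_basic_vowel(ch):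
--         return True
--     if ch == 'y':
--         # 'y' là nguyên âm nếu nó không phải ký tự đầu tiên
--         # và ký tự trước đó là phụ âm.
--         if i > 0 and not is_basic_vowel(word[i-1]):
--             return True
--     return False
--
-- def get_v_c_pattern(word: str) -> str:
--     """Tạo chuỗi ký hiệu V/C cho từ dựa trên quy tắc Porter."""
--     pattern = ""
--     for i in range(len(word)):
--         if is_vowel_porter(word, i):
--             pattern += "V"
--         else:
--             pattern += "C"
--     return pattern
--
-- def calculate_m(word: str) -> int:
--     """
--     Tính độ đo m (measure) của từ.
--     m là số lần lặp lại của mẫu (VC), ví dụ: C(VC)^m V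
--     """
--     if not word:
--         return 0
--
--     # Lấy chuỗi pattern C/V
--     vc_pattern = get_v_c_pattern(word)
--
--     # Đếm số lần chuyển đổi từ C -> V -> C
--     # Mẫu cần tìm: C V C V C V...
--
--     m = 0
--     # Bắt đầu tìm kiếm từ V đầu tiên
--     start_index = -1
--     for i, char in enumerate(vc_pattern):
--         if char == 'V':
--             start_index = i
--             break
--
--     if start_index == -1: # Không có nguyên âm nào
--         return 0
--
--     i = start_index
--     while i < len(vc_pattern):
--         # Bước 1: Quét qua tất cả các V liên tiếp (đầu tiên)
--         if vc_pattern[i] == 'V':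
--             while i < len(vc_pattern) and vc_pattern[i] == 'V':
--                 i += 1
--
--             # Bước 2: Quét qua tất cả các C liên tiếp (thứ hai)
--             if i < len(vc_pattern) and vc_pattern[i] == 'C':
--                 while i < len(vc_pattern) and vc_pattern[i] == 'C':
--                     i += 1
--
--                 # Nếu chuỗi tiếp tục với V, ta đã tìm thấy một cặp (VC)
--                 if i < len(vc_pattern) and vc_pattern[i] == 'V':
--                     m += 1
--                 else:
--                     break # Kết thúc bằng C hoặc hết chuỗi
--             else:
--                 break # Kết thúc bằng V hoặc hết chuỗi
--         else:
--             # Bắt đầu không phải V (tức là C)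
--             i += 1
--
--     return m
-- ===== SOURCE B (Python) =====
-- def calculate_m(word: str) -> int:
--     # Simpler: one linear pass counting maximal vowel ('V') groups g; m = max(g-1, 0).
--     def is_v(i):
--         ch = word[i].lower()
--         if ch in "aeiou":
--             return True
--         return ch == 'y' and i > 0 and word[i-1] not in "aeiou"
--     pattern = ['V' if is_v(i) else 'C' for i in range(len(word))]
--     g = 0
--     prev = 'C'
--     for ch in pattern:
--         if ch == 'V' and prev == 'C':
--             g += 1
--         prev = ch
--     return max(g - 1, 0)
-- ===== Notes on version B (the rewrite author's own statement) =====
-- stated objective: simpler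
-- what changed: Replaced A's find-first-vowel plus nested while-loop V/C scanning by a list-comprehension pattern and a single linear pass counting maximal vowel groups g, returning max(g-1,0), which equals A's result.
import Mathlib
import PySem

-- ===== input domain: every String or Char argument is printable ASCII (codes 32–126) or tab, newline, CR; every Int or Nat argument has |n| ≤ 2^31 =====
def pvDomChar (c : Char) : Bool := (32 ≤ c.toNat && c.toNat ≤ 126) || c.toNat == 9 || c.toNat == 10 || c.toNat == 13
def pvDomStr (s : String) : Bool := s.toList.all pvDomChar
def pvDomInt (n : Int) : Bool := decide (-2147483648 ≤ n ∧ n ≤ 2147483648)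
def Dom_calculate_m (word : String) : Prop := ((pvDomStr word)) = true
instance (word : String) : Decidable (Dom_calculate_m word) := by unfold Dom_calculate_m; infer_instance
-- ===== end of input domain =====

-- B replaces A's find-first-vowel + nested while scans with one linear pass counting maximal
-- vowel groups g in the same V/C pattern and returning max(g-1,0) (simpler, same cost).


-- ===== PORT A =====
-- ch in "aeiou"
def is_basic_vowel (ch : Char) : Bool :=
  ch = 'a' || ch = 'e' || ch = 'i' || ch = 'o' || ch = 'u'

-- is_vowel_porter(word, i) over the char list, i a valid index (as in A's callers)
def is_vowel_porter (l : List Char) (i : Nat) : Bool :=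
  let ch := PySem.Chars.lowerChar (l.getD i ' ')
  if is_basic_vowel ch then true
  else if ch = 'y' then
    (if i > 0 && !(is_basic_vowel (l.getD (i - 1) ' ')) then true else false)
  else false

-- pattern += "V"/"C" over range(len(word))
def get_v_c_pattern (l : List Char) : List Char :=
  (List.range l.length).foldl
    (fun pattern i => pattern ++ [if is_vowel_porter l i then 'V' else 'C']) []

-- inner `while … == 'V': i += 1`
def skipV : List Char → List Char
  | [] => []
  | c :: r => if c = 'V' then skipV r else c :: r

-- inner `while … == 'C': i += 1`
def skipC : List Char → List Char
  | [] => []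
  | c :: r => if c = 'C' then skipC r else c :: r

theorem skipV_length_le : ∀ p : List Char, (skipV p).length ≤ p.length := by
  intro p; induction p with
  | nil => simp [skipV]
  | cons c r ih => simp only [skipV]; split <;> simp <;> omega

theorem skipC_length_le : ∀ p : List Char, (skipC p).length ≤ p.length := by
  intro p; induction p with
  | nil => simp [skipC]
  | cons c r ih => simp only [skipC]; split <;> simp <;> omega

-- A's outer `while i < len(vc_pattern)` loop, on the suffix of the pattern at i
def mLoop (p : List Char) (m : Int) : Int :=
  match p with
  | [] => m
  | c :: rest =>
    if c = 'V' then
      -- step 1: scan consecutive V's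
      match hs1 : skipV (c :: rest) with
      | [] => m                               -- end of string
      | c1 :: t1 =>
        if c1 = 'C' then
          -- step 2: scan consecutive C's
          match hs2 : skipC (c1 :: t1) with
          | [] => m                           -- ends with C (end of string)
          | c2 :: t2 =>
            if c2 = 'V' then mLoop (c2 :: t2) (m + 1)   -- found a (VC) pair
            else m                            -- ends with C
        else m                                -- ends with V
    else mLoop rest m                         -- starts with C: i += 1
termination_by p.length
decreasing_by
  · have h1 : (c1 :: t1).length ≤ (c :: rest).length := hs1 ▸ skipV_length_le _
    have h2 : skipC (c1 :: t1) = skipC t1 := by rename_i hc1 _; simp [skipC, hc1]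
    have h3 : (skipC t1).length ≤ t1.length := skipC_length_le t1
    have h5 : (c2 :: t2).length = (skipC t1).length := by rw [← h2, hs2]
    simp only [List.length_cons] at *
    omega
  · simp

-- `for i, char in enumerate(pattern): if char == 'V': start = i; break` + slicing to start
def findV : List Char → List Char
  | [] => []
  | c :: r => if c = 'V' then c :: r else findV r

def calculate_m (word : String) : Int :=
  let l := word.toList
  if l = [] then 0
  else
    let vc := get_v_c_pattern l
    let s := findV vc
    if s = [] then 0       -- no vowel at all
    else mLoop s 0

-- ===== PORT B =====
def alt_is_v (l : List Char) (i : Nat) : Bool :=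
  let ch := PySem.Chars.lowerChar (l.getD i ' ')
  if ch = 'a' || ch = 'e' || ch = 'i' || ch = 'o' || ch = 'u' then true
  else ch = 'y' && decide (i > 0) &&
       !(let p := l.getD (i - 1) ' '; p = 'a' || p = 'e' || p = 'i' || p = 'o' || p = 'u')

def calculate_m_alt (word : String) : Int :=
  let l := word.toList
  let pattern := (List.range l.length).map (fun i => if alt_is_v l i then 'V' else 'C')
  let g : Int := (pattern.foldl
      (fun (st : Int × Char) ch =>
        (if ch = 'V' && st.2 = 'C' then st.1 + 1 else st.1, ch))
      (0, 'C')).1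
  max (g - 1) 0

-- ===== PRECONDITION & SPEC =====
def Spec_calculate_m (word : String) (out : Int) : Prop := out = calculate_m_alt word
instance (word : String) (out : Int) : Decidable (Spec_calculate_m word out) := by unfold Spec_calculate_m; infer_instance

-- ===== CLAIM (what is proved, stated in full; the proofs are below) =====
def Claim_equal_calculate_m : Prop := ∀ (word : String), Dom_calculate_m word → Spec_calculate_m word (calculate_m word)

-- ===== LEMMAS AND PROOFS =====

-- number of group-starts B counts on suffix p, given previous pattern char `prev`
def runs (prev : Char) : List Char → Nat
  | [] => 0
  | c :: r => (if c = 'V' && prev = 'C' then 1 else 0) + runs c r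

theorem fold_runs (p : List Char) : ∀ (g : Int) (prev : Char),
    (p.foldl (fun (st : Int × Char) ch =>
        (if ch = 'V' ∧ st.2 = 'C' then st.1 + 1 else st.1, ch)) (g, prev)).1
      = g + (runs prev p : Int) := by
  induction p with
  | nil => intro g prev; simp [runs]
  | cons c r ih =>
    intro g prev
    simp only [List.foldl_cons]
    rw [ih]
    simp only [runs]
    by_cases h : c = 'V' ∧ prev = 'C' <;> simp [h] <;> push_cast <;> ring

theorem runs_skipV (r : List Char) : runs 'V' r = runs 'C' (skipV r) := by
  induction r with
  | nil => simp [skipV, runs]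
  | cons c t ih =>
    by_cases h : c = 'V'
    · subst h; simpa [skipV, runs] using ih
    · simp [skipV, runs, h]

theorem runs_skipC (r : List Char) : runs 'C' r = runs 'C' (skipC r) := by
  induction r with
  | nil => simp [skipC, runs]
  | cons c t ih =>
    by_cases h : c = 'C'
    · subst h; simpa [skipC, runs] using ih
    · simp [skipC, runs, h]

theorem skipV_subset : ∀ {p : List Char} {c : Char}, c ∈ skipV p → c ∈ p := by
  intro p; induction p with
  | nil => intro c h; simpa [skipV] using h
  | cons d t ih =>
    intro c h
    by_cases hd : d = 'V'
    · simp only [skipV, hd, if_pos rfl] at h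
      exact List.mem_cons_of_mem _ (ih h)
    · simpa [skipV, hd] using h

theorem skipC_subset : ∀ {p : List Char} {c : Char}, c ∈ skipC p → c ∈ p := by
  intro p; induction p with
  | nil => intro c h; simpa [skipC] using h
  | cons d t ih =>
    intro c h
    by_cases hd : d = 'C'
    · simp only [skipC, hd, if_pos rfl] at h
      exact List.mem_cons_of_mem _ (ih h)
    · simpa [skipC, hd] using h

theorem skipV_head_ne : ∀ {p : List Char} {c : Char} {t : List Char},
    skipV p = c :: t → c ≠ 'V' := by
  intro p; induction p with
  | nil => intro c t h; simp [skipV] at h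
  | cons d r ih =>
    intro c t h
    by_cases hd : d = 'V'
    · exact ih (by simpa [skipV, hd] using h)
    · simp [skipV, hd] at h; intro hc; exact hd (h.1 ▸ hc)

theorem skipC_head_ne : ∀ {p : List Char} {c : Char} {t : List Char},
    skipC p = c :: t → c ≠ 'C' := by
  intro p; induction p with
  | nil => intro c t h; simp [skipC] at h
  | cons d r ih =>
    intro c t h
    by_cases hd : d = 'C'
    · exact ih (by simpa [skipC, hd] using h)
    · simp [skipC, hd] at h; intro hc; exact hd (h.1 ▸ hc)

theorem findV_head : ∀ {p : List Char} {c : Char} {t : List Char},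
    findV p = c :: t → c = 'V' := by
  intro p; induction p with
  | nil => intro c t h; simp [findV] at h
  | cons d r ih =>
    intro c t h
    by_cases hd : d = 'V'
    · rw [findV, if_pos hd] at h
      injection h with h1 _
      exact h1 ▸ hd
    · exact ih (by simpa [findV, hd] using h)

theorem findV_subset : ∀ {p : List Char} {c : Char}, c ∈ findV p → c ∈ p := by
  intro p; induction p with
  | nil => intro c h; simpa [findV] using h
  | cons d t ih =>
    intro c h
    by_cases hd : d = 'V'
    · simpa [findV, hd] using h
    · simp only [findV, hd, if_neg hd] at h
      exact List.mem_cons_of_mem _ (ih h)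

theorem runs_findV (p : List Char) (hpure : ∀ c ∈ p, c = 'V' ∨ c = 'C') :
    runs 'C' p = runs 'C' (findV p) := by
  induction p with
  | nil => simp [findV]
  | cons c t ih =>
    by_cases h : c = 'V'
    · simp [findV, h]
    · have hc : c = 'C' := (hpure c (List.mem_cons_self)).resolve_left h
      subst hc
      simp only [findV, runs, if_neg h]
      simpa using ih (fun d hd => hpure d (List.mem_cons_of_mem _ hd))

-- the key invariant: A's outer loop on a pure V/C suffix starting with 'V'
theorem mLoop_eq : ∀ (n : Nat) (s : List Char) (m : Int), s.length ≤ n →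
    (∀ c ∈ s, c = 'V' ∨ c = 'C') → s.head? = some 'V' →
    mLoop s m = m + (runs 'C' s : Int) - 1 := by
  intro n
  induction n with
  | zero => intro s m hn _ hh; cases s <;> simp_all
  | succ n ih =>
    intro s m hn hpure hh
    rcases s with _ | ⟨c, rest⟩
    · simp at hh
    · have hc : c = 'V' := by simpa using hh
      subst hc
      have hsv : skipV ('V' :: rest) = skipV rest := by simp [skipV]
      have hr : runs 'C' ('V' :: rest) = 1 + runs 'C' (skipV rest) := by
        simp [runs, ← runs_skipV]
      rw [mLoop, if_pos rfl]
      split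
      -- match skipV ('V' :: rest) = []
      next hs1 =>
        rw [hsv] at hs1
        simp [hs1, runs] at hr
        simp [runs, hr]
      next c1 t1 hs1 =>
        split_ifs with hc1
        case neg =>
          -- skipV output never starts with 'V', pattern is pure: impossible to be ≠ 'C'
          have hc1ne : c1 ≠ 'V' := skipV_head_ne hs1
          have hc1mem : c1 ∈ 'V' :: rest := skipV_subset (hs1 ▸ List.mem_cons_self)
          exact absurd ((hpure c1 hc1mem).resolve_left hc1ne) hc1
        case pos =>
          have hsc : skipC (c1 :: t1) = skipC t1 := by simp [skipC, hc1]
          have hr2 : runs 'C' ('V' :: rest) = 1 + runs 'C' (skipC t1) := by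
            rw [hsv] at hs1
            rw [hr, hs1]
            have h0 : runs 'C' (c1 :: t1) = runs 'C' (skipC (c1 :: t1)) := runs_skipC _
            rw [hsc] at h0
            rw [← h0]
          split
          next hs2 =>
            rw [hsc] at hs2
            simp [hs2, runs] at hr2
            simp [runs, hr2]
          next c2 t2 hs2 =>
            have hc2ne : c2 ≠ 'C' := skipC_head_ne hs2
            have hc2mem : c2 ∈ 'V' :: rest := by
              have h1 : c2 ∈ c1 :: t1 := skipC_subset (hs2 ▸ List.mem_cons_self)
              exact skipV_subset (hs1 ▸ h1)
            have hc2 : c2 = 'V' := (hpure c2 hc2mem).resolve_right hc2ne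
            rw [if_pos hc2]
            have hlen : (c2 :: t2).length ≤ n := by
              have e1 : (c1 :: t1).length ≤ ('V' :: rest).length :=
                hs1 ▸ skipV_length_le _
              have e3 : (c2 :: t2).length = (skipC t1).length := by
                rw [← hsc, hs2]
              have e4 : (skipC t1).length ≤ t1.length := skipC_length_le t1
              simp only [List.length_cons] at *
              omega
            have hpure2 : ∀ d ∈ (c2 :: t2), d = 'V' ∨ d = 'C' := by
              intro d hd
              apply hpure
              have h1 : d ∈ c1 :: t1 := skipC_subset (hs2 ▸ hd)
              exact skipV_subset (hs1 ▸ h1)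
            rw [ih (c2 :: t2) (m + 1) hlen hpure2 (by simp [hc2])]
            have h5 : runs 'C' (c2 :: t2) = runs 'C' (skipC t1) := by
              rw [← hsc, hs2]
            rw [hr2, h5]
            push_cast
            ring

theorem runs_pos (t : List Char) : 1 ≤ runs 'C' ('V' :: t) := by
  simp [runs]

theorem pattern_eq (l : List Char) :
    get_v_c_pattern l
      = (List.range l.length).map (fun i => if alt_is_v l i then 'V' else 'C') := by
  have hiv : ∀ i, is_vowel_porter l i = alt_is_v l i := by
    intro i
    simp only [is_vowel_porter, alt_is_v, is_basic_vowel]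
    split_ifs <;> simp_all
  have : ∀ (k : Nat) (acc : List Char),
      (List.range k).foldl
        (fun pattern i => pattern ++ [if is_vowel_porter l i then 'V' else 'C']) acc
      = acc ++ (List.range k).map (fun i => if alt_is_v l i then 'V' else 'C') := by
    intro k
    induction k with
    | zero => intro acc; simp
    | succ k ih =>
      intro acc
      rw [List.range_succ, List.foldl_append]
      simp only [List.foldl_cons, List.foldl_nil]
      rw [ih]
      simp [hiv, List.append_assoc]
  simpa [get_v_c_pattern] using this l.length []

theorem pattern_pure (l : List Char) :
    ∀ c ∈ (List.range l.length).map (fun i => if alt_is_v l i then 'V' else 'C'),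
      c = 'V' ∨ c = 'C' := by
  intro c hc
  rcases List.mem_map.1 hc with ⟨i, _, hi⟩
  by_cases h : alt_is_v l i = true <;> simp [h] at hi <;> [exact Or.inl hi.symm; exact Or.inr hi.symm]

-- ===== VERDICT (by name: the statement is the Claim_ definition above) =====
theorem calculate_m_spec : Claim_equal_calculate_m := by
  intro word _
  unfold Spec_calculate_m calculate_m calculate_m_alt
  simp only [Bool.and_eq_true, decide_eq_true_eq]
  set l := word.toList with hl
  set pat := (List.range l.length).map (fun i => if alt_is_v l i then 'V' else 'C') with hpat
  have hfold := fold_runs pat 0 'C'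
  have hpure := pattern_pure l
  rw [← hpat] at hpure
  by_cases hnil : l = []
  · simp [hnil, hpat]
  · rw [if_neg hnil, pattern_eq, ← hpat]
    have hrf : runs 'C' pat = runs 'C' (findV pat) := runs_findV pat hpure
    rcases hfv : findV pat with _ | ⟨c, t⟩
    · rw [if_pos rfl]
      rw [hfv] at hrf
      simp [runs] at hrf
      rw [hfold, hrf]
      simp
    · have hc : c = 'V' := findV_head hfv
      subst hc
      have hpure2 : ∀ d ∈ ('V' :: t), d = 'V' ∨ d = 'C' := fun d hd =>
        hpure d (findV_subset (hfv ▸ hd))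
      have hml := mLoop_eq ('V' :: t).length ('V' :: t) 0 le_rfl hpure2 rfl
      have hpos := runs_pos t
      rw [if_neg (by simp)]
      rw [hfv] at hrf
      rw [hml, hfold, hrf]
      have h1 : (1 : Int) ≤ (runs 'C' ('V' :: t) : Int) := by exact_mod_cast hpos
      omega
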